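-- pv_equiv track=rewrite | github.com/FlaBBB/Cybers_security | 2023/LKS 2023/Belajar/Cryptography/1-aha/ahash.py | my_hash_function
-- ===== SOURCE A (Python) =====
-- def my_hash_function(c):
--     chunks = [c[i:i + 2] for i in range(0, len(c), 2)]
--     rv = [hex(len(c))[2:]]
--     for ck in chunks:
--         if len(ck) < 2:
--             rv.append(hex(ck[0]**2)[2:])
--             break
--         rv.append(hex((ck[0]**3 - ck[1]**3) * ck[1])[2:])
--     return 'g'.join(rv)
-- ===== SOURCE B (Python) =====
-- def my_hash_function(c):
--     out = hex(len(c))[2:]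
--     pending = None
--     for x in c:
--         if pending is None:
--             pending = x
--         else:
--             out += 'g' + hex((pending**3 - x**3) * x)[2:]
--             pending = None
--     if pending is not None:
--         out += 'g' + hex(pending**2)[2:]
--     return out
-- ===== Notes on version B (the rewrite author's own statement) =====
-- stated objective: alternative
-- what changed: B is a single element-wise pass with a pending-element state machine that appends each hex term directly to the output string, instead of materialising a list of 2-slices, looping over chunks with a break, and joining a list at the end.
import Mathlib
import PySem

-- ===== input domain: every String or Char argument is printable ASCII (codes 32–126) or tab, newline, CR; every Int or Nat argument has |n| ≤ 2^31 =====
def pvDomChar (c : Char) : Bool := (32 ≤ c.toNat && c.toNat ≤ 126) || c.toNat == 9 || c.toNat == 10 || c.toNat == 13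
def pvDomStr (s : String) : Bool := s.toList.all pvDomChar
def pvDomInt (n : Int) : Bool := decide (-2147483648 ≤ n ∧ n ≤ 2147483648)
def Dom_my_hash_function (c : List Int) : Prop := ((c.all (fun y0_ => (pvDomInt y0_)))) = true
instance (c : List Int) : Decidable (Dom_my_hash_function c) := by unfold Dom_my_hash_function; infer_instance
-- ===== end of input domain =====

-- B replaces A's chunk-list + break + join pipeline by one element-wise pass with a
-- pending-element state machine that appends each term directly to the output string.

-- shared helper: Python's hex(n)[2:] as a list of chars (hex(-m) is '-0x…', so [2:] keeps an 'x')
def pvHexDigit (n : Nat) : Char := if n < 10 then Char.ofNat (48 + n) else Char.ofNat (87 + n)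

def pvNatHex : Nat → List Char
  | 0 => []
  | (n+1) => pvNatHex ((n+1) / 16) ++ [pvHexDigit ((n+1) % 16)]
decreasing_by exact Nat.div_lt_self (Nat.succ_pos n) (by omega)

-- hex(n)[2:]  (exact: hex(0)='0x0' → '0', hex(-m)='-0x…' → 'x…')
def pyHexBody (n : Int) : List Char :=
  if n < 0 then 'x' :: pvNatHex (-n).toNat
  else if n = 0 then ['0']
  else pvNatHex n.toNat

-- ===== PORT A =====
-- the for-loop with its in-loop break over the chunk list
def aLoop : List (List Int) → List (List Char) → List (List Char)
  | [], rv => rv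
  | ck :: rest, rv =>
      if ck.length < 2 then
        rv ++ [pyHexBody ((PySem.List.pyGetD ck 0 0) ^ 2)]
      else
        aLoop rest (rv ++ [pyHexBody (((PySem.List.pyGetD ck 0 0) ^ 3 - (PySem.List.pyGetD ck 1 0) ^ 3) * PySem.List.pyGetD ck 1 0)])

def my_hash_function (c : List Int) : String :=
  let chunks := (PySem.List.pyRange 0 c.length 2).map (fun i => PySem.List.slice c (some i) (some (i + 2)))
  let rv := aLoop chunks [pyHexBody c.length]
  String.ofList (PySem.Chars.join ['g'] rv)

-- ===== PORT B =====
-- state machine: (output so far, pending unpaired element)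
def bStep (s : List Char × Option Int) (x : Int) : List Char × Option Int :=
  match s.2 with
  | none => (s.1, some x)
  | some p => (s.1 ++ 'g' :: pyHexBody ((p ^ 3 - x ^ 3) * x), none)

def my_hash_function_alt (c : List Int) : String :=
  let s := c.foldl bStep (pyHexBody c.length, none)
  match s.2 with
  | none => String.ofList s.1
  | some p => String.ofList (s.1 ++ 'g' :: pyHexBody (p ^ 2))

-- ===== PRECONDITION & SPEC =====
def Spec_my_hash_function (c : List Int) (out : String) : Prop := out = my_hash_function_alt c
instance (c : List Int) (out : String) : Decidable (Spec_my_hash_function c out) := by unfold Spec_my_hash_function; infer_instance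

-- ===== CLAIM (what is proved, stated in full; the proofs are below) =====
def Claim_equal_my_hash_function : Prop := ∀ (c : List Int), Dom_my_hash_function c → Spec_my_hash_function c (my_hash_function c)

-- ===== LEMMAS AND PROOFS =====

-- the canonical two-step chunking A's slice-comprehension computes
def chunkD : List Int → List (List Int)
  | [] => []
  | [x] => [[x]]
  | a :: b :: t => [a, b] :: chunkD t

lemma chunks_closed (c : List Int) :
    (PySem.List.pyRange 0 c.length 2).map (fun i => PySem.List.slice c (some i) (some (i + 2)))
      = (List.range ((c.length + 1) / 2)).map (fun k => (c.drop (2 * k)).take 2) := by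
  rw [PySem.List.pyRange_of_pos 0 c.length (by omega)]
  rcases Nat.eq_zero_or_pos c.length with h | h
  · simp [h]
  · rw [if_pos (by exact_mod_cast h)]
    have hcnt : ((c.length : Int) - 0 + 2 - 1) / 2 = ((c.length + 1) / 2 : Nat) := by
      omega
    rw [hcnt, Int.toNat_natCast, List.map_map]
    refine List.map_congr_left (fun k _ => ?_)
    show PySem.List.slice c (some (0 + 2 * (k : Int))) (some (0 + 2 * (k : Int) + 2)) = _
    have : (0 + 2 * (k : Int)) = ((2 * k : Nat) : Int) := by push_cast; ring
    rw [this, show ((2 * k : Nat) : Int) + 2 = ((2 * k : Nat) : Int) + ((2 : Nat) : Int) from rfl,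
      PySem.List.slice_natCast_add]

lemma chunks_eq_chunkD (c : List Int) :
    (List.range ((c.length + 1) / 2)).map (fun k => (c.drop (2 * k)).take 2) = chunkD c := by
  induction c using chunkD.induct with
  | case1 => simp [chunkD]
  | case2 x => simp [chunkD]
  | case3 a b t ih =>
      have hlen : ((a :: b :: t).length + 1) / 2 = (t.length + 1) / 2 + 1 := by
        simp; omega
      rw [hlen, List.range_succ_eq_map, List.map_cons, List.map_map]
      refine congrArg₂ _ (by simp) ?_
      rw [← ih]
      refine List.map_congr_left (fun k _ => ?_)
      simp [show 2 * (k + 1) = 2 * k + 1 + 1 from by omega, List.drop_succ_cons]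

-- the hex terms both programs produce, read off the input two at a time
def termsD : List Int → List (List Char)
  | [] => []
  | [x] => [pyHexBody (x ^ 2)]
  | a :: b :: t => pyHexBody ((a ^ 3 - b ^ 3) * b) :: termsD t

lemma aLoop_chunkD (c : List Int) (rv : List (List Char)) :
    aLoop (chunkD c) rv = rv ++ termsD c := by
  induction c using chunkD.induct generalizing rv with
  | case1 => simp [chunkD, aLoop, termsD]
  | case2 x =>
      simp [chunkD, aLoop, termsD, PySem.List.pyGetD, PySem.List.pyGet?, PySem.List.pyIdx?]
  | case3 a b t ih =>
      have h2 : ¬ ([a, b].length < 2) := by simp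
      rw [chunkD, aLoop, if_neg h2, ih]
      simp [termsD, PySem.List.pyGetD, PySem.List.pyGet?, PySem.List.pyIdx?]

-- B's finish step
def bFinish (s : List Char × Option Int) : List Char :=
  match s.2 with
  | none => s.1
  | some p => s.1 ++ 'g' :: pyHexBody (p ^ 2)

-- each term prefixed by the separator, concatenated (what B's += loop builds)
def gTerms (xs : List (List Char)) : List Char := (xs.map ('g' :: ·)).flatten

lemma bFold_terms (c : List Int) (out : List Char) :
    bFinish (c.foldl bStep (out, none)) = out ++ gTerms (termsD c) := by
  induction c using chunkD.induct generalizing out with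
  | case1 => simp [bFinish, termsD, gTerms]
  | case2 x => simp [bStep, bFinish, termsD, gTerms]
  | case3 a b t ih =>
      rw [List.foldl_cons, List.foldl_cons]
      show bFinish (t.foldl bStep (out ++ 'g' :: pyHexBody ((a ^ 3 - b ^ 3) * b), none)) = _
      rw [ih, termsD]
      simp [gTerms]

lemma join_g (h : List Char) (xs : List (List Char)) :
    PySem.Chars.join ['g'] (h :: xs) = h ++ gTerms xs := by
  induction xs generalizing h with
  | nil => simp [PySem.Chars.join, List.intercalate, gTerms]
  | cons y ys ih =>
      rw [PySem.Chars.join_cons_cons, ih]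
      simp [gTerms]

-- ===== VERDICT (by name: the statement is the Claim_ definition above) =====
theorem my_hash_function_spec : Claim_equal_my_hash_function := by
  intro c _
  show my_hash_function c = my_hash_function_alt c
  have hB : my_hash_function_alt c
      = String.ofList (pyHexBody c.length ++ gTerms (termsD c)) := by
    unfold my_hash_function_alt
    rw [show (match (c.foldl bStep (pyHexBody c.length, none)).2 with
        | none => String.ofList (c.foldl bStep (pyHexBody c.length, none)).1
        | some p => String.ofList ((c.foldl bStep (pyHexBody c.length, none)).1 ++ 'g' :: pyHexBody (p ^ 2)))
        = String.ofList (bFinish (c.foldl bStep (pyHexBody c.length, none))) from by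
          unfold bFinish; cases (c.foldl bStep (pyHexBody c.length, none)).2 <;> rfl]
    rw [bFold_terms]
  simp only [my_hash_function, chunks_closed, chunks_eq_chunkD, aLoop_chunkD, hB,
    List.singleton_append, join_g]
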